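-- pv_equiv track=rewrite | github.com/SaxxonPike/iidx-ps2tools | animtool/ps2textures.py | readTexPSMT4
-- ===== SOURCE A (Python) =====
-- block4 = [
--      0,  2,  8, 10,
--      1,  3,  9, 11,
--      4,  6, 12, 14,
--      5,  7, 13, 15,
--     16, 18, 24, 26,
--     17, 19, 25, 27,
--     20, 22, 28, 30,
--     21, 23, 29, 31
-- ]
--
-- columnWord4 = [
--     [
--          0,  1,  4,  5,  8,  9, 12, 13,   0,  1,  4,  5,  8,  9, 12, 13,   0,  1,  4,  5,  8,  9, 12, 13,   0,  1,  4,  5,  8,  9, 12, 13,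
--          2,  3,  6,  7, 10, 11, 14, 15,   2,  3,  6,  7, 10, 11, 14, 15,   2,  3,  6,  7, 10, 11, 14, 15,   2,  3,  6,  7, 10, 11, 14, 15,
--
--          8,  9, 12, 13,  0,  1,  4,  5,   8,  9, 12, 13,  0,  1,  4,  5,   8,  9, 12, 13,  0,  1,  4,  5,   8,  9, 12, 13,  0,  1,  4,  5,
--         10, 11, 14, 15,  2,  3,  6,  7,  10, 11, 14, 15,  2,  3,  6,  7,  10, 11, 14, 15,  2,  3,  6,  7,  10, 11, 14, 15,  2,  3,  6,  7
--     ],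
--     [
--          8,  9, 12, 13,  0,  1,  4,  5,   8,  9, 12, 13,  0,  1,  4,  5,   8,  9, 12, 13,  0,  1,  4,  5,   8,  9, 12, 13,  0,  1,  4,  5,
--         10, 11, 14, 15,  2,  3,  6,  7,  10, 11, 14, 15,  2,  3,  6,  7,  10, 11, 14, 15,  2,  3,  6,  7,  10, 11, 14, 15,  2,  3,  6,  7,
--
--          0,  1,  4,  5,  8,  9, 12, 13,   0,  1,  4,  5,  8,  9, 12, 13,   0,  1,  4,  5,  8,  9, 12, 13,   0,  1,  4,  5,  8,  9, 12, 13,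
--          2,  3,  6,  7, 10, 11, 14, 15,   2,  3,  6,  7, 10, 11, 14, 15,   2,  3,  6,  7, 10, 11, 14, 15,   2,  3,  6,  7, 10, 11, 14, 15
--     ]
-- ]
--
-- columnByte4 = [
--     0, 0, 0, 0, 0, 0, 0, 0,  2, 2, 2, 2, 2, 2, 2, 2,  4, 4, 4, 4, 4, 4, 4, 4,  6, 6, 6, 6, 6, 6, 6, 6,
--     0, 0, 0, 0, 0, 0, 0, 0,  2, 2, 2, 2, 2, 2, 2, 2,  4, 4, 4, 4, 4, 4, 4, 4,  6, 6, 6, 6, 6, 6, 6, 6,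
--
--     1, 1, 1, 1, 1, 1, 1, 1,  3, 3, 3, 3, 3, 3, 3, 3,  5, 5, 5, 5, 5, 5, 5, 5,  7, 7, 7, 7, 7, 7, 7, 7,
--     1, 1, 1, 1, 1, 1, 1, 1,  3, 3, 3, 3, 3, 3, 3, 3,  5, 5, 5, 5, 5, 5, 5, 5,  7, 7, 7, 7, 7, 7, 7, 7
-- ]
--
-- def readTexPSMT4(dbp, dbw, dsax, dsay, rrw, rrh, data, gsmem):
--     data_idx = 0
--     startBlockPos = dbp * 64
--
--     dbw >>= 1
--
--     odd = False
--
--     for y in range(dsay, dsay + rrh):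
--         for x in range(dsax, dsax + rrw):
--             pageX = x // 128
--             pageY = y // 128
--             page  = pageX + pageY * dbw
--
--             px = x - (pageX * 128)
--             py = y - (pageY * 128)
--
--             blockX = px // 32
--             blockY = py // 16
--             block  = block4[blockX + blockY * 4]
--
--             bx = px - blockX * 32
--             by = py - blockY * 16
--
--             column = by // 4
--
--             cx = bx
--             cy = by - column * 4
--             cw = columnWord4[column & 1][cx + cy * 32]
--             cb = columnByte4[cx + cy * 32]
--
--             if cb & 1:
--                 if odd:
--                     data[data_idx] = ((data[data_idx]) & 0x0f) | (gsmem[(startBlockPos + page * 2048 + block * 64 + column * 16 + cw) * 4 + (cb >> 1)] & 0xf0)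
--                 else:
--                     data[data_idx] = ((data[data_idx]) & 0xf0) | ((gsmem[(startBlockPos + page * 2048 + block * 64 + column * 16 + cw) * 4 + (cb >> 1)] >> 4) & 0x0f)
--
--             else:
--                 if odd:
--                     data[data_idx] = ((data[data_idx]) & 0x0f) | ((gsmem[(startBlockPos + page * 2048 + block * 64 + column * 16 + cw) * 4 + (cb >> 1)] << 4) & 0xf0)
--                 else:
--                     data[data_idx] = ((data[data_idx]) & 0xf0) | (gsmem[(startBlockPos + page * 2048 + block * 64 + column * 16 + cw) * 4 + (cb >> 1)] & 0x0f)
--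
--             if odd:
--                 data_idx += 1
--
--             odd = not odd
--
--     return data
-- ===== SOURCE B (Python) =====
-- # Two-phase re-implementation: extract flat 4-bit nibble list, then pack pairs into bytes.
-- block4 = [
--      0,  2,  8, 10,
--      1,  3,  9, 11,
--      4,  6, 12, 14,
--      5,  7, 13, 15,
--     16, 18, 24, 26,
--     17, 19, 25, 27,
--     20, 22, 28, 30,
--     21, 23, 29, 31
-- ]
--
-- columnWord4 = [
--     [
--          0,  1,  4,  5,  8,  9, 12, 13,   0,  1,  4,  5,  8,  9, 12, 13,   0,  1,  4,  5,  8,  9, 12, 13,   0,  1,  4,  5,  8,  9, 12, 13,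
--          2,  3,  6,  7, 10, 11, 14, 15,   2,  3,  6,  7, 10, 11, 14, 15,   2,  3,  6,  7, 10, 11, 14, 15,   2,  3,  6,  7, 10, 11, 14, 15,
--          8,  9, 12, 13,  0,  1,  4,  5,   8,  9, 12, 13,  0,  1,  4,  5,   8,  9, 12, 13,  0,  1,  4,  5,   8,  9, 12, 13,  0,  1,  4,  5,
--         10, 11, 14, 15,  2,  3,  6,  7,  10, 11, 14, 15,  2,  3,  6,  7,  10, 11, 14, 15,  2,  3,  6,  7,  10, 11, 14, 15,  2,  3,  6,  7
--     ],
--     [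
--          8,  9, 12, 13,  0,  1,  4,  5,   8,  9, 12, 13,  0,  1,  4,  5,   8,  9, 12, 13,  0,  1,  4,  5,   8,  9, 12, 13,  0,  1,  4,  5,
--         10, 11, 14, 15,  2,  3,  6,  7,  10, 11, 14, 15,  2,  3,  6,  7,  10, 11, 14, 15,  2,  3,  6,  7,  10, 11, 14, 15,  2,  3,  6,  7,
--          0,  1,  4,  5,  8,  9, 12, 13,   0,  1,  4,  5,  8,  9, 12, 13,   0,  1,  4,  5,  8,  9, 12, 13,   0,  1,  4,  5,  8,  9, 12, 13,
--          2,  3,  6,  7, 10, 11, 14, 15,   2,  3,  6,  7, 10, 11, 14, 15,   2,  3,  6,  7, 10, 11, 14, 15,   2,  3,  6,  7, 10, 11, 14, 15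
--     ]
-- ]
--
-- columnByte4 = [
--     0, 0, 0, 0, 0, 0, 0, 0,  2, 2, 2, 2, 2, 2, 2, 2,  4, 4, 4, 4, 4, 4, 4, 4,  6, 6, 6, 6, 6, 6, 6, 6,
--     0, 0, 0, 0, 0, 0, 0, 0,  2, 2, 2, 2, 2, 2, 2, 2,  4, 4, 4, 4, 4, 4, 4, 4,  6, 6, 6, 6, 6, 6, 6, 6,
--     1, 1, 1, 1, 1, 1, 1, 1,  3, 3, 3, 3, 3, 3, 3, 3,  5, 5, 5, 5, 5, 5, 5, 5,  7, 7, 7, 7, 7, 7, 7, 7,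
--     1, 1, 1, 1, 1, 1, 1, 1,  3, 3, 3, 3, 3, 3, 3, 3,  5, 5, 5, 5, 5, 5, 5, 5,  7, 7, 7, 7, 7, 7, 7, 7
-- ]
--
--
-- def _cell(dbw, y, x):
--     """Word offset (within the buffer, before the base) and column-byte of pixel (x, y)."""
--     pageX = x // 128
--     pageY = y // 128
--     page = pageX + pageY * dbw
--     px = x - pageX * 128
--     py = y - pageY * 128
--     blockX = px // 32
--     blockY = py // 16
--     block = block4[blockX + blockY * 4]
--     bx = px - blockX * 32
--     by = py - blockY * 16
--     column = by // 4
--     cx = bx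
--     cy = by - column * 4
--     cw = columnWord4[column & 1][cx + cy * 32]
--     cb = columnByte4[cx + cy * 32]
--     return page * 2048 + block * 64 + column * 16 + cw, cb
--
--
-- def _nibble(gsmem, dbw, startBlockPos, y, x):
--     cell, cb = _cell(dbw, y, x)
--     g = gsmem[(startBlockPos + cell) * 4 + (cb >> 1)]
--     if cb & 1:
--         return (g >> 4) & 0x0f
--     else:
--         return g & 0x0f
--
--
-- def readTexPSMT4(dbp, dbw, dsax, dsay, rrw, rrh, data, gsmem):
--     dbw >>= 1
--     startBlockPos = dbp * 64
--
--     nibbles = []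
--     for y in range(dsay, dsay + rrh):
--         for x in range(dsax, dsax + rrw):
--             nibbles.append(_nibble(gsmem, dbw, startBlockPos, y, x))
--
--     i = 0
--     j = 0
--     while i + 1 < len(nibbles):
--         data[j] = (nibbles[i + 1] << 4) | nibbles[i]
--         i += 2
--         j += 1
--     if i < len(nibbles):
--         data[j] = (data[j] & 0xf0) | nibbles[i]
--     return data
-- ===== Notes on version B (the rewrite author's own statement) =====
-- stated objective: alternative
-- what changed: A does one stateful in-place pass that read-modify-writes each output byte twice, toggling an odd flag and masking nibbles in four branches; B first collects a flat list of 4-bit values in the same traversal order and then packs them pairwise into bytes in a second pass, preserving the old high bits only for a trailing odd nibble.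
import Mathlib
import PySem

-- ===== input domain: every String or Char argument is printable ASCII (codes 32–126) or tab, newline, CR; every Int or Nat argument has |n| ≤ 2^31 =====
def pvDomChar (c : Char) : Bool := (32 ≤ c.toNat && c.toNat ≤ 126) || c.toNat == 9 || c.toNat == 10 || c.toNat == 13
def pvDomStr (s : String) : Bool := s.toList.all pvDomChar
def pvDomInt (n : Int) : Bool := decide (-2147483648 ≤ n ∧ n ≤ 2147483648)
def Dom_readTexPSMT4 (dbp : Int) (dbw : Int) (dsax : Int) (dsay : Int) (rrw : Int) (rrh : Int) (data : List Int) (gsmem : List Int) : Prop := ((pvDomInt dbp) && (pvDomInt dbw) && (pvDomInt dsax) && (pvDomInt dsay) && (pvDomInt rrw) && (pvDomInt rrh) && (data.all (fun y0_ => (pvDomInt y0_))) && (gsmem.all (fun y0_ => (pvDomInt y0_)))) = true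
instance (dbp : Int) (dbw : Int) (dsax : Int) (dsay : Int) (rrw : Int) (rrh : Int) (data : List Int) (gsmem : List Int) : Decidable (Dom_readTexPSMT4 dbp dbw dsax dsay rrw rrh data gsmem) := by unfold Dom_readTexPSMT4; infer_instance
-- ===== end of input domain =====

-- B re-implements A in two phases (extract flat nibble list, then pack pairs into bytes) instead of
-- A's single stateful in-place pass; equivalence is about the RETURN value (both Pythons write the
-- same final bytes into `data` in place).

-- ===== PORT A =====
-- module-level tables, shared verbatim by both Pythons
def pvBlock4 : List Int := [
     0,  2,  8, 10,
     1,  3,  9, 11,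
     4,  6, 12, 14,
     5,  7, 13, 15,
    16, 18, 24, 26,
    17, 19, 25, 27,
    20, 22, 28, 30,
    21, 23, 29, 31]

def pvColumnWord4 : List (List Int) := [
    [0,  1,  4,  5,  8,  9, 12, 13,   0,  1,  4,  5,  8,  9, 12, 13,   0,  1,  4,  5,  8,  9, 12, 13,   0,  1,  4,  5,  8,  9, 12, 13,
     2,  3,  6,  7, 10, 11, 14, 15,   2,  3,  6,  7, 10, 11, 14, 15,   2,  3,  6,  7, 10, 11, 14, 15,   2,  3,  6,  7, 10, 11, 14, 15,
     8,  9, 12, 13,  0,  1,  4,  5,   8,  9, 12, 13,  0,  1,  4,  5,   8,  9, 12, 13,  0,  1,  4,  5,   8,  9, 12, 13,  0,  1,  4,  5,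
    10, 11, 14, 15,  2,  3,  6,  7,  10, 11, 14, 15,  2,  3,  6,  7,  10, 11, 14, 15,  2,  3,  6,  7,  10, 11, 14, 15,  2,  3,  6,  7],
    [8,  9, 12, 13,  0,  1,  4,  5,   8,  9, 12, 13,  0,  1,  4,  5,   8,  9, 12, 13,  0,  1,  4,  5,   8,  9, 12, 13,  0,  1,  4,  5,
    10, 11, 14, 15,  2,  3,  6,  7,  10, 11, 14, 15,  2,  3,  6,  7,  10, 11, 14, 15,  2,  3,  6,  7,  10, 11, 14, 15,  2,  3,  6,  7,
     0,  1,  4,  5,  8,  9, 12, 13,   0,  1,  4,  5,  8,  9, 12, 13,   0,  1,  4,  5,  8,  9, 12, 13,   0,  1,  4,  5,  8,  9, 12, 13,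
     2,  3,  6,  7, 10, 11, 14, 15,   2,  3,  6,  7, 10, 11, 14, 15,   2,  3,  6,  7, 10, 11, 14, 15,   2,  3,  6,  7, 10, 11, 14, 15]]

def pvColumnByte4 : List Int := [
    0, 0, 0, 0, 0, 0, 0, 0,  2, 2, 2, 2, 2, 2, 2, 2,  4, 4, 4, 4, 4, 4, 4, 4,  6, 6, 6, 6, 6, 6, 6, 6,
    0, 0, 0, 0, 0, 0, 0, 0,  2, 2, 2, 2, 2, 2, 2, 2,  4, 4, 4, 4, 4, 4, 4, 4,  6, 6, 6, 6, 6, 6, 6, 6,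
    1, 1, 1, 1, 1, 1, 1, 1,  3, 3, 3, 3, 3, 3, 3, 3,  5, 5, 5, 5, 5, 5, 5, 5,  7, 7, 7, 7, 7, 7, 7, 7,
    1, 1, 1, 1, 1, 1, 1, 1,  3, 3, 3, 3, 3, 3, 3, 3,  5, 5, 5, 5, 5, 5, 5, 5,  7, 7, 7, 7, 7, 7, 7, 7]

-- A's loop body, verbatim (state = (data, data_idx, odd)); gsmem reads/data writes are the total
-- pyGetD/pySetD forms — Pre_ excludes exactly the out-of-range accesses on which Python raises
def readTexAStep (gsmem : List Int) (dbw : Int) (startBlockPos : Int)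
    (st : List Int × Int × Bool) (y : Int) (x : Int) : List Int × Int × Bool :=
  let data := st.1
  let data_idx := st.2.1
  let odd := st.2.2
  let pageX := PySem.Int.floordiv x 128
  let pageY := PySem.Int.floordiv y 128
  let page := pageX + pageY * dbw
  let px := x - pageX * 128
  let py := y - pageY * 128
  let blockX := PySem.Int.floordiv px 32
  let blockY := PySem.Int.floordiv py 16
  let block := PySem.List.pyGetD pvBlock4 (blockX + blockY * 4) 0
  let bx := px - blockX * 32
  let by' := py - blockY * 16
  let column := PySem.Int.floordiv by' 4
  let cx := bx
  let cy := by' - column * 4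
  let cw := PySem.List.pyGetD (PySem.List.pyGetD pvColumnWord4 (PySem.Int.band column 1) []) (cx + cy * 32) 0
  let cb := PySem.List.pyGetD pvColumnByte4 (cx + cy * 32) 0
  let data' :=
    if PySem.Int.band cb 1 ≠ 0 then
      if odd then
        PySem.List.pySetD data data_idx
          (PySem.Int.bor (PySem.Int.band (PySem.List.pyGetD data data_idx 0) 0x0f)
            (PySem.Int.band (PySem.List.pyGetD gsmem ((startBlockPos + (page * 2048 + block * 64 + column * 16 + cw)) * 4 + (cb >>> (1:Nat))) 0) 0xf0))
      else
        PySem.List.pySetD data data_idx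
          (PySem.Int.bor (PySem.Int.band (PySem.List.pyGetD data data_idx 0) 0xf0)
            (PySem.Int.band ((PySem.List.pyGetD gsmem ((startBlockPos + (page * 2048 + block * 64 + column * 16 + cw)) * 4 + (cb >>> (1:Nat))) 0) >>> (4:Nat)) 0x0f))
    else
      if odd then
        PySem.List.pySetD data data_idx
          (PySem.Int.bor (PySem.Int.band (PySem.List.pyGetD data data_idx 0) 0x0f)
            (PySem.Int.band ((PySem.List.pyGetD gsmem ((startBlockPos + (page * 2048 + block * 64 + column * 16 + cw)) * 4 + (cb >>> (1:Nat))) 0) <<< (4:Nat)) 0xf0))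
      else
        PySem.List.pySetD data data_idx
          (PySem.Int.bor (PySem.Int.band (PySem.List.pyGetD data data_idx 0) 0xf0)
            (PySem.Int.band (PySem.List.pyGetD gsmem ((startBlockPos + (page * 2048 + block * 64 + column * 16 + cw)) * 4 + (cb >>> (1:Nat))) 0) 0x0f))
  (data', (if odd then data_idx + 1 else data_idx), !odd)

def readTexPSMT4 (dbp : Int) (dbw : Int) (dsax : Int) (dsay : Int) (rrw : Int) (rrh : Int) (data : List Int) (gsmem : List Int) : List Int :=
  ((PySem.List.pyRange dsay (dsay + rrh) 1).foldl
      (fun st yv => (PySem.List.pyRange dsax (dsax + rrw) 1).foldl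
          (fun st2 xv => readTexAStep gsmem (dbw >>> (1:Nat)) (dbp * 64) st2 yv xv) st)
      (data, 0, false)).1

-- ===== PORT B =====
-- _cell(dbw, y, x): word offset within the buffer (before the base) and column-byte of pixel (x, y)
def pvCell (dbw : Int) (y : Int) (x : Int) : Int × Int :=
  let pageX := PySem.Int.floordiv x 128
  let pageY := PySem.Int.floordiv y 128
  let page := pageX + pageY * dbw
  let px := x - pageX * 128
  let py := y - pageY * 128
  let blockX := PySem.Int.floordiv px 32
  let blockY := PySem.Int.floordiv py 16
  let block := PySem.List.pyGetD pvBlock4 (blockX + blockY * 4) 0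
  let bx := px - blockX * 32
  let by' := py - blockY * 16
  let column := PySem.Int.floordiv by' 4
  let cx := bx
  let cy := by' - column * 4
  let cw := PySem.List.pyGetD (PySem.List.pyGetD pvColumnWord4 (PySem.Int.band column 1) []) (cx + cy * 32) 0
  let cb := PySem.List.pyGetD pvColumnByte4 (cx + cy * 32) 0
  (page * 2048 + block * 64 + column * 16 + cw, cb)

-- _nibble(gsmem, dbw, startBlockPos, y, x): the 4-bit value of pixel (x, y)
def pvNib (gsmem : List Int) (dbw : Int) (startBlockPos : Int) (y : Int) (x : Int) : Int :=
  let c := pvCell dbw y x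
  let g := PySem.List.pyGetD gsmem ((startBlockPos + c.1) * 4 + (c.2 >>> (1:Nat))) 0
  if PySem.Int.band c.2 1 ≠ 0 then PySem.Int.band (g >>> (4:Nat)) 0x0f else PySem.Int.band g 0x0f

-- the packing while-loop of B, as structural pair recursion over the nibble list
def pvPack (d : List Int) (ns : List Int) (j : Nat) : List Int :=
  match ns with
  | [] => d
  | [v] => PySem.List.pySetD d (j : Int) (PySem.Int.bor (PySem.Int.band (PySem.List.pyGetD d (j : Int) 0) 0xf0) v)
  | v :: w :: t => pvPack (PySem.List.pySetD d (j : Int) (PySem.Int.bor (w <<< (4:Nat)) v)) t (j + 1)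

def readTexPSMT4_alt (dbp : Int) (dbw : Int) (dsax : Int) (dsay : Int) (rrw : Int) (rrh : Int) (data : List Int) (gsmem : List Int) : List Int :=
  let dbw2 := dbw >>> (1:Nat)
  let startBlockPos := dbp * 64
  let nibbles := (PySem.List.pyRange dsay (dsay + rrh) 1).foldl
      (fun acc yv => (PySem.List.pyRange dsax (dsax + rrw) 1).foldl
          (fun acc2 xv => acc2 ++ [pvNib gsmem dbw2 startBlockPos yv xv]) acc) []
  pvPack data nibbles 0

-- ===== PRECONDITION & SPEC =====
-- the gsmem byte index A reads for the pixel with page coordinates (pX, pY) and in-page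
-- coordinates (px, py) (same address arithmetic as both programs; x = 128*pX + px, y = 128*pY + py)
def pvAddrAt (dbw : Int) (sbp : Int) (pX : Int) (pY : Int) (px : Int) (py : Int) : Int :=
  let blockX := PySem.Int.floordiv px 32
  let blockY := PySem.Int.floordiv py 16
  let block := PySem.List.pyGetD pvBlock4 (blockX + blockY * 4) 0
  let bx := px - blockX * 32
  let by' := py - blockY * 16
  let column := PySem.Int.floordiv by' 4
  let cy := by' - column * 4
  let cw := PySem.List.pyGetD (PySem.List.pyGetD pvColumnWord4 (PySem.Int.band column 1) []) (bx + cy * 32) 0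
  let cb := PySem.List.pyGetD pvColumnByte4 (bx + cy * 32) 0
  (sbp + (pX + pY * dbw) * 2048 + block * 64 + column * 16 + cw) * 4 + (cb >>> (1:Nat))

-- For fixed in-page coordinates (px, py) the address above is AFFINE in pX and in pY, and the
-- pages touched for a given px (resp. py) form the integer interval [mX, MX] (resp. [mY, MY]);
-- so "every read of the loop is a valid Python index" holds iff it holds at the four corner
-- pages — which is checkable in constant time even for huge rrw/rrh.
def pvCornersOk (dbw : Int) (sbp : Int) (mX : Int) (MX : Int) (dsay : Int) (rrh : Int) (L : Nat) (px : Int) (py : Int) : Bool :=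
  let mY := PySem.Int.floordiv (dsay - py + 127) 128
  let MY := PySem.Int.floordiv (dsay + rrh - 1 - py) 128
  if mY ≤ MY then
    decide (PySem.Raise.InRange L (pvAddrAt dbw sbp mX mY px py)) &&
    decide (PySem.Raise.InRange L (pvAddrAt dbw sbp mX MY px py)) &&
    decide (PySem.Raise.InRange L (pvAddrAt dbw sbp MX mY px py)) &&
    decide (PySem.Raise.InRange L (pvAddrAt dbw sbp MX MY px py))
  else true

def pvRowOk (dbw : Int) (sbp : Int) (dsax : Int) (dsay : Int) (rrw : Int) (rrh : Int) (L : Nat) (px : Int) : Bool :=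
  let mX := PySem.Int.floordiv (dsax - px + 127) 128
  let MX := PySem.Int.floordiv (dsax + rrw - 1 - px) 128
  if mX ≤ MX then
    (PySem.List.pyRange 0 128 1).all (fun py => pvCornersOk dbw sbp mX MX dsay rrh L px py)
  else true

-- exactly the inputs on which Python A returns: every gsmem read of the loop is a valid Python
-- index (negative wrap-around included; stated by the corner reduction above) and data is long
-- enough for every data[data_idx] access
def Pre_readTexPSMT4 (dbp : Int) (dbw : Int) (dsax : Int) (dsay : Int) (rrw : Int) (rrh : Int) (data : List Int) (gsmem : List Int) : Prop :=
  ((PySem.List.pyRange 0 128 1).all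
      (fun px => pvRowOk (dbw >>> (1:Nat)) (dbp * 64) dsax dsay rrw rrh gsmem.length px) = true) ∧
  (rrh.toNat * rrw.toNat + 1) / 2 ≤ data.length
instance (dbp : Int) (dbw : Int) (dsax : Int) (dsay : Int) (rrw : Int) (rrh : Int) (data : List Int) (gsmem : List Int) : Decidable (Pre_readTexPSMT4 dbp dbw dsax dsay rrw rrh data gsmem) := by unfold Pre_readTexPSMT4; infer_instance

def pvWitness_readTexPSMT4 : Int × Int × Int × Int × Int × Int × List Int × List Int :=
  (0, 0, 0, 0, 0, 0, [], [])

def Spec_readTexPSMT4 (dbp : Int) (dbw : Int) (dsax : Int) (dsay : Int) (rrw : Int) (rrh : Int) (data : List Int) (gsmem : List Int) (out : List Int) : Prop := out = readTexPSMT4_alt dbp dbw dsax dsay rrw rrh data gsmem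
instance (dbp : Int) (dbw : Int) (dsax : Int) (dsay : Int) (rrw : Int) (rrh : Int) (data : List Int) (gsmem : List Int) (out : List Int) : Decidable (Spec_readTexPSMT4 dbp dbw dsax dsay rrw rrh data gsmem out) := by unfold Spec_readTexPSMT4; infer_instance

-- ===== CLAIM (what is proved, stated in full; the proofs are below) =====
def Claim_equal_readTexPSMT4 : Prop := ∀ (dbp : Int) (dbw : Int) (dsax : Int) (dsay : Int) (rrw : Int) (rrh : Int) (data : List Int) (gsmem : List Int), Dom_readTexPSMT4 dbp dbw dsax dsay rrw rrh data gsmem → Pre_readTexPSMT4 dbp dbw dsax dsay rrw rrh data gsmem → Spec_readTexPSMT4 dbp dbw dsax dsay rrw rrh data gsmem (readTexPSMT4 dbp dbw dsax dsay rrw rrh data gsmem)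

-- ===== LEMMAS AND PROOFS =====


theorem pv_shr4 (g : Int) : g >>> (4:Nat) = g / 16 := by
  cases g with
  | ofNat n =>
      show (Int.ofNat (n >>> 4)) = _
      rw [Nat.shiftRight_eq_div_pow]
      norm_num
  | negSucc n =>
      show (Int.negSucc (n >>> 4)) = _
      rw [Nat.shiftRight_eq_div_pow]
      simp [Int.negSucc_eq]
      omega

theorem pv_shl4 (g : Int) : g <<< (4:Nat) = g * 16 := by
  cases g with
  | ofNat n =>
      show (Int.ofNat (n <<< 4)) = _
      rw [Nat.shiftLeft_eq]
      norm_num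
  | negSucc n =>
      show (Int.negSucc ((n + 1) <<< 4 - 1)) = _
      rw [Nat.shiftLeft_eq]
      simp [Int.negSucc_eq]
      omega

theorem pv_band15 (g : Int) : PySem.Int.band g 15 = g % 16 := by
  unfold PySem.Int.band
  split_ifs with h1 h2 h2 <;> try omega
  · have h15 : ((15:Int)).toNat = 15 := rfl
    rw [h15, (show (15:Nat) = 2^4 - 1 by norm_num), Nat.and_two_pow_sub_one_eq_mod]
    omega
  · have h15 : ((15:Int)).toNat = 15 := rfl
    rw [h15, Nat.land_comm, (show (15:Nat) = 2^4 - 1 by norm_num), Nat.and_two_pow_sub_one_eq_mod]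
    omega

theorem pv_nat240 (n : Nat) : n &&& 240 = ((n / 16) % 16) * 16 := by
  have h : ((n / 16) % 16) * 16 = ((n >>> 4) &&& 15) <<< 4 := by
    rw [Nat.shiftLeft_eq, Nat.shiftRight_eq_div_pow,
        (show (15:Nat) = 2^4 - 1 by norm_num), Nat.and_two_pow_sub_one_eq_mod]
  rw [h, (show (240:Nat) = 15 <<< 4 by decide)]
  apply Nat.eq_of_testBit_eq
  intro i
  simp only [Nat.testBit_land, Nat.testBit_shiftLeft, Nat.testBit_shiftRight,
    (show (15:Nat) = 2^4 - 1 by norm_num), Nat.testBit_two_pow_sub_one]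
  by_cases h4 : 4 <= i
  · have hi : 4 + (i - 4) = i := by omega
    rw [hi]
    simp [h4]
  · simp [h4]

theorem pv_band240 (g : Int) : PySem.Int.band g 240 = g % 256 - g % 16 := by
  unfold PySem.Int.band
  split_ifs with h1 h2 h2 <;> try omega
  · have h240 : ((240:Int)).toNat = 240 := rfl
    rw [h240, pv_nat240]
    omega
  · have h240 : ((240:Int)).toNat = 240 := rfl
    rw [h240, Nat.land_comm, pv_nat240]
    omega

set_option maxRecDepth 100000 in
theorem pv_norAdd : ∀ a : Nat, a < 241 → ∀ b : Nat, b < 16 → a % 16 = 0 → a ||| b = a + b := by decide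

theorem pv_bor16 (a b : Int) (h0 : 0 ≤ a) (h1 : a ≤ 240) (h2 : a % 16 = 0) (h3 : 0 ≤ b) (h4 : b < 16) :
    PySem.Int.bor a b = a + b := by
  unfold PySem.Int.bor
  split_ifs <;> try omega
  rw [pv_norAdd a.toNat (by omega) b.toNat (by omega) (by omega)]
  omega

theorem pvC1 (g : Int) : PySem.Int.band g 240 = (PySem.Int.band (g >>> (4:Nat)) 15) <<< (4:Nat) := by
  rw [pv_band240, pv_shr4, pv_band15, pv_shl4]; omega

theorem pvC2 (g : Int) : PySem.Int.band (g <<< (4:Nat)) 240 = (PySem.Int.band g 15) <<< (4:Nat) := by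
  rw [pv_band240, pv_shl4, pv_band15, pv_shl4]; omega

theorem pv_nib_bounds (gsmem : List Int) (dbw startBlockPos y x : Int) :
    0 ≤ pvNib gsmem dbw startBlockPos y x ∧ pvNib gsmem dbw startBlockPos y x < 16 := by
  simp only [pvNib]
  split <;> rw [pv_band15] <;> omega

theorem pv_combine (w v1 v2 : Int) (h1 : 0 ≤ v1) (h2 : v1 < 16) (h3 : 0 ≤ v2) (h4 : v2 < 16) :
    PySem.Int.bor (PySem.Int.band (PySem.Int.bor (PySem.Int.band w 240) v1) 15) (v2 <<< (4:Nat))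
      = PySem.Int.bor (v2 <<< (4:Nat)) v1 := by
  have hX := pv_band240 w
  rw [pv_bor16 _ _ (by omega) (by omega) (by omega) h1 h2, pv_band15, pv_shl4]
  rw [PySem.Int.bor_comm]
  rw [pv_bor16 _ _ (by omega) (by omega) (by omega) (by omega) (by omega)]
  rw [pv_bor16 _ _ (by omega) (by omega) (by omega) h1 h2]
  omega

theorem pv_stepA_even (G : List Int) (dbw sbp : Int) (d : List Int) (i : Int) (y x : Int) :
    readTexAStep G dbw sbp (d, i, false) y x
      = (PySem.List.pySetD d i (PySem.Int.bor (PySem.Int.band (PySem.List.pyGetD d i 0) 0xf0) (pvNib G dbw sbp y x)), i, true) := by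
  simp only [readTexAStep, pvNib, pvCell]
  split <;> rfl

theorem pv_stepA_odd (G : List Int) (dbw sbp : Int) (d : List Int) (i : Int) (y x : Int) :
    readTexAStep G dbw sbp (d, i, true) y x
      = (PySem.List.pySetD d i (PySem.Int.bor (PySem.Int.band (PySem.List.pyGetD d i 0) 0x0f) ((pvNib G dbw sbp y x) <<< (4:Nat))), i + 1, false) := by
  simp only [readTexAStep, pvNib, pvCell, if_true]
  split
  · rw [pvC1]; rfl
  · rw [pvC2]; rfl

theorem pv_writepair (d : List Int) (j : Nat) (v1 v2 : Int) (h1 : 0 ≤ v1) (h2 : v1 < 16) (h3 : 0 ≤ v2) (h4 : v2 < 16) :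
    PySem.List.pySetD (PySem.List.pySetD d (j:Int) (PySem.Int.bor (PySem.Int.band (PySem.List.pyGetD d (j:Int) 0) 0xf0) v1)) (j:Int)
      (PySem.Int.bor (PySem.Int.band (PySem.List.pyGetD (PySem.List.pySetD d (j:Int) (PySem.Int.bor (PySem.Int.band (PySem.List.pyGetD d (j:Int) 0) 0xf0) v1)) (j:Int) 0) 0x0f) (v2 <<< (4:Nat)))
      = PySem.List.pySetD d (j:Int) (PySem.Int.bor (v2 <<< (4:Nat)) v1) := by
  simp only [PySem.List.pySetD_natCast, PySem.List.pyGetD_natCast]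
  by_cases hj : j < d.length
  · rw [List.set_set]
    have hg : (d.set j (PySem.Int.bor (PySem.Int.band (d.getD j 0) 240) v1)).getD j 0
        = PySem.Int.bor (PySem.Int.band (d.getD j 0) 240) v1 := by simp [List.getD, hj]
    rw [hg, pv_combine (d.getD j 0) v1 v2 h1 h2 h3 h4]
  · have hle : d.length ≤ j := by omega
    simp only [List.set_eq_of_length_le hle]

theorem pv_foldA (G : List Int) (dbw sbp : Int) :
    ∀ (ps : List (Int × Int)) (d : List Int) (j : Nat),
      ps.foldl (fun st p => readTexAStep G dbw sbp st p.1 p.2) (d, (j:Int), false)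
        = (pvPack d (ps.map fun p => pvNib G dbw sbp p.1 p.2) j, ((j + ps.length / 2 : Nat) : Int), decide (ps.length % 2 = 1))
  | [], d, j => by simp [pvPack]
  | [p], d, j => by
      rw [List.foldl_cons, List.foldl_nil, pv_stepA_even]
      simp [pvPack]
  | p :: q :: t, d, j => by
      rw [List.foldl_cons, List.foldl_cons, pv_stepA_even, pv_stepA_odd]
      obtain ⟨e1, e2⟩ := pv_nib_bounds G dbw sbp p.1 p.2
      obtain ⟨e3, e4⟩ := pv_nib_bounds G dbw sbp q.1 q.2
      rw [pv_writepair d j _ _ e1 e2 e3 e4]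
      rw [show ((j:Int) + 1) = ((j+1 : Nat) : Int) by push_cast; ring]
      rw [pv_foldA G dbw sbp t _ (j+1)]
      simp only [pvPack, List.map_cons, List.length_cons, Prod.mk.injEq]
      exact ⟨trivial, by push_cast; omega, by simp only [decide_eq_decide]; omega⟩

theorem pv_nested {σ : Type} (yr xr : List Int) (f : σ → Int → Int → σ) (init : σ) :
    yr.foldl (fun st y => xr.foldl (fun st2 x => f st2 y x) st) init
      = (yr.flatMap fun y => xr.map fun x => (y, x)).foldl (fun st p => f st p.1 p.2) init := by
  induction yr generalizing init with
  | nil => rfl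
  | cons h t ih => rw [List.foldl_cons, List.flatMap_cons, List.foldl_append, List.foldl_map]; exact ih _

theorem pv_nibList (yr xr : List Int) (g : Int → Int → Int) (acc : List Int) :
      yr.foldl (fun a y => xr.foldl (fun a2 x => a2 ++ [g y x]) a) acc
        = acc ++ (yr.flatMap fun y => xr.map fun x => (y, x)).map fun p => g p.1 p.2 := by
  induction yr generalizing acc with
  | nil => simp
  | cons h t ih =>
      rw [List.foldl_cons, PySem.List.foldl_append_singleton_eq_map, ih]
      simp [List.map_map, Function.comp_def]

-- ===== VERDICT (by name: the statement is the Claim_ definition above) =====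
theorem readTexPSMT4_spec : Claim_equal_readTexPSMT4 := by
  intro dbp dbw dsax dsay rrw rrh data gsmem _ _
  simp only [Spec_readTexPSMT4, readTexPSMT4, readTexPSMT4_alt]
  rw [pv_nested, pv_nibList, List.nil_append]
  have h := pv_foldA gsmem (dbw >>> (1:Nat)) (dbp * 64)
    ((PySem.List.pyRange dsay (dsay + rrh) 1).flatMap fun y => (PySem.List.pyRange dsax (dsax + rrw) 1).map fun x => (y, x))
    data 0
  simp only [Nat.cast_zero] at h
  rw [h]
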